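-- pv_equiv track=rewrite | github.com/Bulando/-Entangled-Algorithm- | keywords.py | Merge_synonyms_utils
-- ===== SOURCE A (Python) =====
-- def Merge_synonyms_utils(new_ckeys_mainwords):
--     mains = []
--     for mainwords in new_ckeys_mainwords.values():
--         mains.extend(mainwords)
--     compete_mainwords = set([main for main in mains if mains.count(main) > 1])
--     mainwords_ckeys_1_n = {}
--     for main in compete_mainwords:
--         for kw, mainwords in new_ckeys_mainwords.items():
--             if main in mainwords:
--                 mainwords_ckeys_1_n.setdefault(main, []).append(kw)
--     return compete_mainwords, mainwords_ckeys_1_n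
-- ===== SOURCE B (Python) =====
-- def Merge_synonyms_utils(new_ckeys_mainwords):
--     counts = {}
--     index = {}
--     for kw, mainwords in new_ckeys_mainwords.items():
--         seen = set()
--         for main in mainwords:
--             counts[main] = counts.get(main, 0) + 1
--             if main not in seen:
--                 seen.add(main)
--                 index.setdefault(main, []).append(kw)
--     compete_mainwords = {m for m, c in counts.items() if c > 1}
--     mainwords_ckeys_1_n = {m: index.get(m, []) for m in compete_mainwords}
--     return compete_mainwords, mainwords_ckeys_1_n
-- ===== Notes on version B (the rewrite author's own statement) =====
-- stated objective: faster
-- what changed: B makes one pass over the items building an occurrence-count dict and a main->keywords index, then filters the counts, instead of A's quadratic mains.count scan and a full rescan of all items for every competing mainword.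
import Mathlib
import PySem

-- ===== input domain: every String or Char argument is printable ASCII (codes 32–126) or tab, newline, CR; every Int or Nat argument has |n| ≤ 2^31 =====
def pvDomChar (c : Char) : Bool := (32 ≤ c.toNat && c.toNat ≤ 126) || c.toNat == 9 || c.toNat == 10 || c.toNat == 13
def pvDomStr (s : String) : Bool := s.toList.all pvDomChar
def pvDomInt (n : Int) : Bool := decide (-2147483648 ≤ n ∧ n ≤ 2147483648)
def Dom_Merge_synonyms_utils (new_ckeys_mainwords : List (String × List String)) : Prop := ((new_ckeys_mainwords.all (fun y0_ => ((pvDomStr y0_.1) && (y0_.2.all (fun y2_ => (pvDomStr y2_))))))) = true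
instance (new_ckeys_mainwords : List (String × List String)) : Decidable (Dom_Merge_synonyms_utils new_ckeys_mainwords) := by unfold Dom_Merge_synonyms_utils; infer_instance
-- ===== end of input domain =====

-- B replaces A's quadratic mains.count scan and the per-competitor rescan of all items by a single
-- pass building a count dict and a main→keywords index, then a filter (objective: faster, O(total) passes vs nested rescans).
-- Set/dict iteration order is not observable here beyond first-occurrence order, which both ports share.

-- ===== PORT A =====
-- inner loop body of A's per-competitor scan: if main in mainwords: dict.setdefault(main, []).append(kw)
def pvAStep (main : String) (dd2 : PySem.Dict String (List String)) (p : String × List String) : PySem.Dict String (List String) :=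
  if p.2.contains main then dd2.modify main [] (fun l => l ++ [p.1]) else dd2

def Merge_synonyms_utils (new_ckeys_mainwords : List (String × List String)) : List String × (List (String × List String)) :=
  let mains : List String := new_ckeys_mainwords.foldl (fun acc p => acc ++ p.2) []
  let compete : PySem.Set String := PySem.Set.ofList (mains.filter (fun m => mains.count m > 1))
  let res : PySem.Dict String (List String) :=
    compete.foldl (fun dd main => new_ckeys_mainwords.foldl (pvAStep main) dd) PySem.Dict.empty
  (compete, res.items)

-- ===== PORT B =====
-- loop body of B's single pass over one item's mainwords: count every occurrence; index kw once per item
def pvBStep (kw : String) (st : (PySem.Dict String Int × PySem.Dict String (List String)) × PySem.Set String)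
    (m : String) : (PySem.Dict String Int × PySem.Dict String (List String)) × PySem.Set String :=
  let counts := st.1.1.insert m (st.1.1.getD m 0 + 1)
  if st.2.contains m then ((counts, st.1.2), st.2)
  else ((counts, st.1.2.modify m [] (fun l => l ++ [kw])), st.2.add m)

def Merge_synonyms_utils_alt (new_ckeys_mainwords : List (String × List String)) : List String × (List (String × List String)) :=
  let ci : PySem.Dict String Int × PySem.Dict String (List String) :=
    new_ckeys_mainwords.foldl
      (fun ci p => (p.2.foldl (pvBStep p.1) (ci, PySem.Set.empty)).1)
      (PySem.Dict.empty, PySem.Dict.empty)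
  let compete : PySem.Set String := PySem.Set.ofList ((ci.1.items.filter (fun q => q.2 > 1)).map Prod.fst)
  (compete, compete.map (fun m => (m, ci.2.getD m [])))

-- ===== PRECONDITION & SPEC =====
def Spec_Merge_synonyms_utils (new_ckeys_mainwords : List (String × List String)) (out : List String × (List (String × List String))) : Prop := out = Merge_synonyms_utils_alt new_ckeys_mainwords
instance (new_ckeys_mainwords : List (String × List String)) (out : List String × (List (String × List String))) : Decidable (Spec_Merge_synonyms_utils new_ckeys_mainwords out) := by unfold Spec_Merge_synonyms_utils; infer_instance

-- ===== CLAIM (what is proved, stated in full; the proofs are below) =====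
def Claim_equal_Merge_synonyms_utils : Prop := ∀ (new_ckeys_mainwords : List (String × List String)), Dom_Merge_synonyms_utils new_ckeys_mainwords → Spec_Merge_synonyms_utils new_ckeys_mainwords (Merge_synonyms_utils new_ckeys_mainwords)

-- ===== LEMMAS AND PROOFS =====

-- keywords of the items whose mainword list contains m, in item order (the common value of
-- A's per-competitor scan and B's index entry)
def pvKws (d : List (String × List String)) (m : String) : List String :=
  (d.filter (fun p => p.2.contains m)).map Prod.fst

-- B: the counts component of the inner fold ignores index and seen
lemma bInner_counts (kw : String) (mws : List String)
    (st0 : (PySem.Dict String Int × PySem.Dict String (List String)) × PySem.Set String) :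
    (mws.foldl (pvBStep kw) st0).1.1
      = mws.foldl (fun d x => d.insert x (d.getD x 0 + 1)) st0.1.1 := by
  induction mws generalizing st0 with
  | nil => rfl
  | cons x t ih =>
    simp only [List.foldl_cons]
    rw [ih]
    congr 1
    unfold pvBStep
    split <;> rfl

-- B: counts over the whole input is the occurrence counter of the concatenation of all mainword lists
lemma bOuter_counts (d : List (String × List String))
    (ci : PySem.Dict String Int × PySem.Dict String (List String)) :
    (d.foldl (fun ci p => (p.2.foldl (pvBStep p.1) (ci, PySem.Set.empty)).1) ci).1
      = (d.flatMap Prod.snd).foldl (fun dc x => dc.insert x (dc.getD x 0 + 1)) ci.1 := by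
  induction d generalizing ci with
  | nil => rfl
  | cons p t ih =>
    simp only [List.foldl_cons, List.flatMap_cons, List.foldl_append]
    rw [ih, bInner_counts]

-- B: effect of one item's inner fold on the index, pointwise
lemma bInner_index (kw : String) (mws : List String)
    (st0 : (PySem.Dict String Int × PySem.Dict String (List String)) × PySem.Set String) (m : String) :
    ((mws.foldl (pvBStep kw) st0).1.2).getD m []
      = if mws.contains m && !(st0.2.contains m) then st0.1.2.getD m [] ++ [kw]
        else st0.1.2.getD m [] := by
  induction mws generalizing st0 with
  | nil => simp
  | cons x t ih =>
    simp only [List.foldl_cons]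
    rw [ih]
    by_cases hxm : x = m
    · subst hxm
      by_cases hs : x ∈ st0.2
      · simp [pvBStep, hs]
      · simp [pvBStep, hs, PySem.Dict.getD_modify_self]
    · have hmx : ¬ m = x := fun h => hxm h.symm
      by_cases hs : x ∈ st0.2
      · simp [pvBStep, hs, hmx]
      · simp [pvBStep, hs, hmx, PySem.Dict.getD_modify_of_ne _ _ _ hmx]

-- B: the index over the whole input, pointwise
lemma bOuter_index (d : List (String × List String))
    (ci : PySem.Dict String Int × PySem.Dict String (List String)) (m : String) :
    ((d.foldl (fun ci p => (p.2.foldl (pvBStep p.1) (ci, PySem.Set.empty)).1) ci).2).getD m []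
      = ci.2.getD m [] ++ pvKws d m := by
  induction d generalizing ci with
  | nil => simp [pvKws]
  | cons p t ih =>
    simp only [List.foldl_cons]
    rw [ih, bInner_index]
    by_cases hc : m ∈ p.2
    · simp [pvKws, hc, PySem.Set.empty]
    · simp [pvKws, hc, PySem.Set.empty]

-- value at a key sitting at the end of a literal dict whose other keys differ from it
lemma getD_mk_append_last (its : List (String × List String)) (m : String) (v : List String)
    (h : ∀ q ∈ its, (q.1 == m) = false) :
    (PySem.Dict.mk (its ++ [(m, v)])).getD m [] = v := by
  induction its with
  | nil => simp [PySem.Dict.getD_eq_get?_getD, PySem.Dict.get?_mk_cons]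
  | cons q t ih =>
    obtain ⟨k, w⟩ := q
    have hq : (k == m) = false := h (k, w) (by simp)
    have ht : ∀ q ∈ t, (q.1 == m) = false := fun q hq => h q (by simp [hq])
    simpa [PySem.Dict.getD_eq_get?_getD, PySem.Dict.get?_mk_cons, hq] using ih ht

-- A: the per-competitor scan, once the key is sitting at the end of the dict
lemma aScan_at_end (m : String) (d : List (String × List String))
    (its : List (String × List String)) (v : List String)
    (h : ∀ q ∈ its, (q.1 == m) = false) :
    (d.foldl (pvAStep m) (PySem.Dict.mk (its ++ [(m, v)]))).items
      = its ++ [(m, v ++ pvKws d m)] := by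
  induction d generalizing v with
  | nil => simp [pvKws]
  | cons p t ih =>
    simp only [List.foldl_cons]
    by_cases hc : p.2.contains m = true
    · have hcont : (PySem.Dict.mk (its ++ [(m, v)])).contains m = true := by
        simp [PySem.Dict.contains_mk]
      have hstep : pvAStep m (PySem.Dict.mk (its ++ [(m, v)])) p
          = PySem.Dict.mk (its ++ [(m, v ++ [p.1])]) := by
        unfold pvAStep
        rw [if_pos hc]
        apply PySem.Dict.ext
        simp only [PySem.Dict.modify, getD_mk_append_last its m v h]
        rw [PySem.Dict.items_insert_of_contains _ _ hcont]
        rw [List.map_append]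
        congr 1
        · have : List.map (fun q => if (q.1 == m) = true then (m, v ++ [p.1]) else q) its
              = List.map id its := List.map_congr_left (fun q hq => by simp [h q hq])
          simpa using this
        · simp
      rw [hstep, ih (v ++ [p.1])]
      have : m ∈ p.2 := by simpa using hc
      simp [pvKws, this]
    · have hstep : pvAStep m (PySem.Dict.mk (its ++ [(m, v)])) p
          = PySem.Dict.mk (its ++ [(m, v)]) := by
        unfold pvAStep; rw [if_neg hc]
      rw [hstep, ih v]
      have : ¬ m ∈ p.2 := by simpa using hc
      simp [pvKws, this]

-- A: the per-competitor scan from a dict not containing the key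
lemma aScan_fresh (m : String) (d : List (String × List String))
    (dd : PySem.Dict String (List String)) (h : dd.contains m = false) :
    (d.foldl (pvAStep m) dd).items
      = dd.items ++ (if pvKws d m = [] then [] else [(m, pvKws d m)]) := by
  obtain ⟨its⟩ := dd
  rw [PySem.Dict.contains_mk] at h
  have hkeys : ∀ q ∈ its, (q.1 == m) = false := by
    intro q hq
    have := List.any_eq_false.mp h q hq
    simpa using this
  induction d with
  | nil => simp [pvKws]
  | cons p t ih =>
    simp only [List.foldl_cons]
    by_cases hc : p.2.contains m = true
    · have hmem : m ∈ p.2 := by simpa using hc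
      have hstep : pvAStep m (PySem.Dict.mk its) p = PySem.Dict.mk (its ++ [(m, [p.1])]) := by
        unfold pvAStep
        rw [if_pos hc]
        apply PySem.Dict.ext
        simp only [PySem.Dict.modify]
        rw [PySem.Dict.getD_of_not_contains _ _ (by rw [PySem.Dict.contains_mk]; exact h)]
        exact PySem.Dict.items_insert_of_not_contains _ _ (by rw [PySem.Dict.contains_mk]; exact h)
      rw [hstep, aScan_at_end m t its [p.1] hkeys]
      simp only [pvKws, List.contains_eq_mem, List.filter_cons]
      simp [hmem]
    · have hmem : ¬ m ∈ p.2 := by simpa using hc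
      have hstep : pvAStep m (PySem.Dict.mk its) p = PySem.Dict.mk its := by
        unfold pvAStep; rw [if_neg hc]
      rw [hstep, ih]
      simp only [pvKws, List.contains_eq_mem, List.filter_cons]
      rw [if_neg (by simpa using hmem : ¬ decide (m ∈ p.2) = true)]

-- A: the outer fold over the competitor list appends one entry per competitor
lemma aOuter (d : List (String × List String)) (C : List String)
    (dd : PySem.Dict String (List String)) (hC : C.Nodup)
    (h : ∀ m ∈ C, dd.contains m = false) :
    (C.foldl (fun dd main => d.foldl (pvAStep main) dd) dd).items
      = dd.items ++ C.flatMap (fun m => if pvKws d m = [] then [] else [(m, pvKws d m)]) := by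
  induction C generalizing dd with
  | nil => simp
  | cons m C' ih =>
    simp only [List.foldl_cons, List.flatMap_cons]
    have hm := h m (by simp)
    have hitems := aScan_fresh m d dd hm
    have hcontains : ∀ m' ∈ C', (d.foldl (pvAStep m) dd).contains m' = false := by
      intro m' hm'
      have hne : m' ≠ m := by
        rintro rfl
        exact (List.nodup_cons.mp hC).1 hm'
      have hdd : (dd.items.any (fun q => q.1 == m')) = false := by
        have hc' := h m' (by simp [hm'])
        rwa [show dd.contains m' = dd.items.any (fun q => q.1 == m') from
          PySem.Dict.contains_mk dd.items m'] at hc'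
      rw [show (d.foldl (pvAStep m) dd).contains m'
            = (d.foldl (pvAStep m) dd).items.any (fun q => q.1 == m') from
          PySem.Dict.contains_mk _ m', hitems]
      by_cases hk : pvKws d m = [] <;> simp [hk, hdd, Ne.symm hne]
    rw [ih _ (List.nodup_cons.mp hC).2 hcontains, hitems]
    by_cases hk : pvKws d m = [] <;> simp [hk, List.append_assoc]

-- filtering commutes with Python set construction (first-occurrence dedup)
lemma foldl_add_filter (p : String → Bool) (xs : List String) (s : PySem.Set String) :
    (xs.filter p).foldl PySem.Set.add (s.filter p) = (xs.foldl PySem.Set.add s).filter p := by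
  induction xs generalizing s with
  | nil => rfl
  | cons x t ih =>
    have hadd : PySem.Set.add (s.filter p) x = (s.add x).filter p ∨ p x = false := by
      by_cases hp : p x = true
      · left
        by_cases hx : x ∈ s
        · rw [PySem.Set.add_of_mem hx, PySem.Set.add_of_mem (by simp [List.mem_filter, hx, hp])]
        · rw [PySem.Set.add_of_not_mem hx,
            PySem.Set.add_of_not_mem (fun hmem => hx (List.mem_filter.mp hmem).1),
            List.filter_append]
          simp [hp]
      · right; simpa using hp
    by_cases hp : p x = true
    · rw [List.filter_cons_of_pos hp]
      simp only [List.foldl_cons]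
      rcases hadd with hadd | hadd
      · rw [hadd, ih]
      · simp [hp] at hadd
    · rw [List.filter_cons_of_neg (by simp [hp])]
      simp only [List.foldl_cons]
      rw [← ih]
      congr 1
      by_cases hx : x ∈ s
      · rw [PySem.Set.add_of_mem hx]
      · rw [PySem.Set.add_of_not_mem hx, List.filter_append]
        simp [hp]

lemma ofList_filter (p : String → Bool) (xs : List String) :
    PySem.Set.ofList (xs.filter p) = (PySem.Set.ofList xs).filter p := by
  have := foldl_add_filter p xs PySem.Set.empty
  simpa [PySem.Set.ofList, PySem.Set.empty] using this

-- the two competitor lists coincide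
lemma compete_eq (mains : List String) :
    (PySem.Set.ofList (((PySem.Dict.counter mains).items.filter (fun q => q.2 > 1)).map Prod.fst) : PySem.Set String)
      = PySem.Set.ofList (mains.filter (fun m => mains.count m > 1)) := by
  rw [PySem.Dict.items_counter, List.filter_map, List.map_map]
  have h1 : (fun (q : String × Int) => decide (q.2 > 1)) ∘ (fun k => (k, (mains.count k : Int)))
      = fun k => decide (mains.count k > 1) := by
    funext k
    simp [Nat.one_lt_cast]
  rw [h1]
  have h2 : Prod.fst ∘ (fun k => (k, (mains.count k : Int))) = id := rfl
  rw [h2, List.map_id]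
  rw [← ofList_filter]
  exact PySem.Set.ofList_eq_self_of_nodup _ (PySem.Set.nodup_ofList _)

-- every competitor occurs in some item's mainword list
lemma kws_ne_nil (d : List (String × List String)) (m : String)
    (hm : m ∈ (d.flatMap Prod.snd).filter (fun m => (d.flatMap Prod.snd).count m > 1)) :
    pvKws d m ≠ [] := by
  intro hnil
  have hmem : m ∈ d.flatMap Prod.snd := (List.mem_filter.mp hm).1
  obtain ⟨p, hp, hmp⟩ := List.mem_flatMap.mp hmem
  have : p ∈ d.filter (fun p => p.2.contains m) :=
    List.mem_filter.mpr ⟨hp, by simpa [List.contains_eq_mem] using hmp⟩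
  have : p.1 ∈ pvKws d m := List.mem_map.mpr ⟨p, this, rfl⟩
  rw [hnil] at this
  exact (List.not_mem_nil) this

-- a flatMap whose entries are all nonempty singletons is a map
lemma flatMap_if_eq_map (d : List (String × List String)) (C : List String)
    (hne : ∀ m ∈ C, pvKws d m ≠ []) :
    C.flatMap (fun m => if pvKws d m = [] then [] else [(m, pvKws d m)])
      = C.map (fun m => (m, pvKws d m)) := by
  induction C with
  | nil => rfl
  | cons m C' ih =>
    simp only [List.flatMap_cons, List.map_cons]
    rw [if_neg (hne m (by simp)), ih (fun m' hm' => hne m' (by simp [hm']))]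
    rfl

-- ===== VERDICT (by name: the statement is the Claim_ definition above) =====
theorem Merge_synonyms_utils_spec : Claim_equal_Merge_synonyms_utils := by
  intro d _
  unfold Spec_Merge_synonyms_utils Merge_synonyms_utils Merge_synonyms_utils_alt
  simp only [PySem.List.foldl_append_eq_flatMap, List.nil_append, bOuter_counts, bOuter_index,
    PySem.Dict.getD_empty, PySem.Dict.foldl_insert_getD_add_one_eq_counter]
  have hfst := compete_eq (d.flatMap Prod.snd)
  rw [Prod.mk.injEq]
  refine ⟨hfst.symm, ?_⟩
  rw [aOuter d _ PySem.Dict.empty (PySem.Set.nodup_ofList _)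
    (fun _ _ => rfl)]
  rw [flatMap_if_eq_map d _
    (fun m hm => kws_ne_nil d m ((PySem.Set.mem_ofList _ _).mp hm))]
  rw [hfst]
  simp [PySem.Dict.empty]
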